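-- pv_equiv track=rewrite | github.com/Pawka/aoc | 2019/day06.py | solve
-- ===== SOURCE A (Python) =====
-- from collections import defaultdict, deque
--
-- def solve(data):
--     graph = defaultdict(list)
--     bidirectional = defaultdict(list)
--
--     for edge in data:
--         a, b = edge
--         graph[a].append(b)
--         bidirectional[a].append(b)
--         bidirectional[b].append(a)
--
--     def walk(root, depth=0):
--         distance = 1
--         for node in graph[root]:
--             distance += depth + walk(node, depth+1)
--         return distance
--     result1 = walk('COM') - 1
--
--     def solve2(target='SAN'):
--         dist = defaultdict(int)
--         seen = set()
--         visit = deque(['YOU'])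
--
--         while True:
--             current = visit.pop()
--             if current in seen:
--                 continue
--             seen.add(current)
--             for node in bidirectional[current]:
--                 visit.appendleft(node)
--                 dist[node] = dist[current] + 1
--                 if node == target:
--                     return dist[target] - 2
--
--     result2 = solve2()
--     return result1, result2
-- ===== SOURCE B (Python) =====
-- def solve(data):
--     # children: parent -> list of children (edge order)
--     children = {}
--     for a, b in data:
--         children.setdefault(a, []).append(b)
--     # adj: undirected adjacency (edge order, both directions)
--     adj = {}
--     for a, b in data:
--         adj.setdefault(a, []).append(b)
--         adj.setdefault(b, []).append(a)
--
--     # part 1: level-order traversal from COM, total orbits = sum(level * width)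
--     total = 0
--     level = 1
--     frontier = children.get('COM', [])
--     while frontier:
--         total += level * len(frontier)
--         frontier = [c for n in frontier for c in children.get(n, [])]
--         level += 1
--
--     # part 2: level-synchronised BFS from YOU, two plain lists instead of a deque
--     def transfers(target='SAN'):
--         dist = {}
--         seen = set()
--         cur = ['YOU']
--         while cur:
--             nxt = []
--             for node in cur:
--                 if node in seen:
--                     continue
--                 seen.add(node)
--                 for nb in adj.get(node, []):
--                     nxt.append(nb)
--                     dist[nb] = dist.get(node, 0) + 1
--                     if nb == target:
--                         return dist[target] - 2
--             cur = nxt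
--         raise ValueError('no route from YOU to SAN')
--
--     return total, transfers()
-- ===== Notes on version B (the rewrite author's own statement) =====
-- stated objective: alternative
-- what changed: Part 1 replaces A's depth-passing recursion (walk(root,depth) with its distance formula and trailing -1) by an iterative level-order traversal that adds level*len(frontier) per level; part 2 replaces A's deque-with-appendleft/pop BFS by a level-synchronised BFS over two plain lists (cur/nxt), raising ValueError where A's deque underflows.
import Mathlib
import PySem

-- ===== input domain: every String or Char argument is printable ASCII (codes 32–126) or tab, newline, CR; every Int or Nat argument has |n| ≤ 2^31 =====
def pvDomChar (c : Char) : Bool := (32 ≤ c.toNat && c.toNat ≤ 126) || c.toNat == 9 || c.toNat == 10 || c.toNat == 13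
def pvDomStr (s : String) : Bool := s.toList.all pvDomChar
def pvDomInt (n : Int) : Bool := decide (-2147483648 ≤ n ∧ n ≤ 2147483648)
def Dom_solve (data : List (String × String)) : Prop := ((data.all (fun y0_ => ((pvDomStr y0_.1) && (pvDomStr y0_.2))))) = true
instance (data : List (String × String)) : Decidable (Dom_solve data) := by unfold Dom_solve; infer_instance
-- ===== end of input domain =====

-- B replaces A's depth-passing recursion (part 1) by a level-order traversal summing level·width,
-- and A's deque BFS (part 2) by a level-synchronised BFS over two plain lists; return values only.

-- ===== PORT A =====
-- graph/bidirectional: defaultdict(list); x[k].append(v) = modify k [] (· ++ [v])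
def buildA (data : List (String × String)) :
    PySem.Dict String (List String) × PySem.Dict String (List String) :=
  data.foldl (fun gb p =>
    (gb.1.modify p.1 [] (· ++ [p.2]),
     (gb.2.modify p.1 [] (· ++ [p.2])).modify p.2 [] (· ++ [p.1])))
    (PySem.Dict.empty, PySem.Dict.empty)

-- walk(root, depth): fuel added for totality; Pre_solve guarantees it never runs out
def walkA (g : PySem.Dict String (List String)) : Nat → String → Int → Int
  | 0, _, _ => 0
  | f+1, root, depth =>
      (g.getD root []).foldl (fun acc node => acc + depth + walkA g f node (depth+1)) 1

-- inner 'for node in bidirectional[current]' with early return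
def innerA (target current : String) :
    List String → List String → PySem.Dict String Int →
    Sum Int (List String × PySem.Dict String Int)
  | [], visit, dist => Sum.inr (visit, dist)
  | n :: ns, visit, dist =>
      let visit' := n :: visit
      let dist' := dist.insert n (dist.getD current 0 + 1)
      if n == target then Sum.inl (dist'.getD target 0 - 2)
      else innerA target current ns visit' dist'

-- while True: current = visit.pop() …  (deque: appendleft = cons, pop = last; fuel for totality,
-- -1 where Python raises IndexError — excluded by Pre_solve)
def loopA (bi : PySem.Dict String (List String)) (target : String) :
    Nat → List String → PySem.Dict String Int → PySem.Set String → Int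
  | 0, _, _, _ => -1
  | f+1, visit, dist, seen =>
      match visit.getLast? with
      | none => -1
      | some current =>
        let visit' := visit.dropLast
        if PySem.Set.contains seen current then loopA bi target f visit' dist seen
        else
          match innerA target current (bi.getD current []) visit' dist with
          | Sum.inl r => r
          | Sum.inr vd => loopA bi target f vd.1 vd.2 (PySem.Set.add seen current)

def solve (data : List (String × String)) : Int × Int :=
  let gb := buildA data
  let result1 := walkA gb.1 (data.length + 1) "COM" 0 - 1
  let result2 := loopA gb.2 "SAN" (2 * data.length + 2) ["YOU"] PySem.Dict.empty PySem.Set.empty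
  (result1, result2)

-- ===== PORT B =====
-- children.setdefault(a, []).append(b)
def buildCh (data : List (String × String)) : PySem.Dict String (List String) :=
  data.foldl (fun d p => d.modify p.1 [] (· ++ [p.2])) PySem.Dict.empty

def buildAdj (data : List (String × String)) : PySem.Dict String (List String) :=
  data.foldl (fun d p => (d.modify p.1 [] (· ++ [p.2])).modify p.2 [] (· ++ [p.1]))
    PySem.Dict.empty

-- while frontier: total += level*len(frontier); frontier = next level  (fuel for totality)
def levelB (ch : PySem.Dict String (List String)) : Nat → List String → Int → Int → Int
  | 0, _, _, acc => acc
  | f+1, front, lvl, acc =>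
      if front.isEmpty then acc
      else levelB ch f (front.flatMap (fun n => ch.getD n [])) (lvl + 1)
             (acc + lvl * (front.length : Int))

-- inner 'for nb in adj.get(node, [])' with early return
def innerB (target current : String) :
    List String → List String → PySem.Dict String Int →
    Sum Int (List String × PySem.Dict String Int)
  | [], nxt, dist => Sum.inr (nxt, dist)
  | n :: ns, nxt, dist =>
      let nxt' := nxt ++ [n]
      let dist' := dist.insert n (dist.getD current 0 + 1)
      if n == target then Sum.inl (dist'.getD target 0 - 2)
      else innerB target current ns nxt' dist'

-- while cur: for node in cur … ; cur = nxt  (fuel per processed node; -1 where the Python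
-- raises ValueError on exhaustion — excluded by Pre_solve)
def loopB (adj : PySem.Dict String (List String)) (target : String) :
    Nat → List String → List String → PySem.Dict String Int → PySem.Set String → Int
  | 0, _, _, _, _ => -1
  | _+1, [], [], _, _ => -1
  | f+1, [], n :: ns, dist, seen => loopB adj target (f+1) (n :: ns) [] dist seen
  | f+1, c :: cs, nxt, dist, seen =>
      if PySem.Set.contains seen c then loopB adj target f cs nxt dist seen
      else
        match innerB target c (adj.getD c []) nxt dist with
        | Sum.inl r => r
        | Sum.inr nd => loopB adj target f cs nd.1 nd.2 (PySem.Set.add seen c)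
  termination_by f _cur nxt _ _ => (f, nxt.length)
  decreasing_by all_goals simp; omega

def solve_alt (data : List (String × String)) : Int × Int :=
  let ch := buildCh data
  let adj := buildAdj data
  let total := levelB ch (data.length + 2) (ch.getD "COM" []) 1 0
  let result2 := loopB adj "SAN" (2 * data.length + 2) ["YOU"] [] PySem.Dict.empty PySem.Set.empty
  (total, result2)

-- ===== PRECONDITION & SPEC =====
-- the edges leaving x / all undirected neighbours of x
def childrenOf (data : List (String × String)) (x : String) : List String :=
  (data.filter (fun p => p.1 == x)).map Prod.snd

def adjOf (data : List (String × String)) (x : String) : List String :=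
  (data.filter (fun p => p.1 == x)).map Prod.snd ++
    (data.filter (fun p => p.2 == x)).map Prod.fst

-- endpoints of the downward paths of length ℓ starting at COM (with one entry per path)
def downFrontier (data : List (String × String)) : Nat → List String
  | 0 => ["COM"]
  | l+1 => (downFrontier data l).flatMap (fun x => childrenOf data x)

-- undirected reachability closure, saturated after 2·|data|+1 rounds
def uClo (data : List (String × String)) : Nat → PySem.Set String → PySem.Set String
  | 0, s => s
  | f+1, s => uClo data f (PySem.Set.update s (s.flatMap (fun x => adjOf data x)))

-- Pre_ = exactly the inputs on which the Python A returns normally: no downward path of length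
-- |data|+1 from COM (else walk recurses forever — RecursionError), and SAN undirected-reachable
-- from YOU (else the deque empties — IndexError from visit.pop()).
def Pre_solve (data : List (String × String)) : Prop :=
  downFrontier data (data.length + 1) = [] ∧
  "SAN" ∈ uClo data (2 * data.length + 1) (PySem.Set.add PySem.Set.empty "YOU")

instance (data : List (String × String)) : Decidable (Pre_solve data) := by
  unfold Pre_solve; infer_instance

def pvWitness_solve : (List (String × String)) :=
  [("COM", "A"), ("A", "YOU"), ("A", "SAN"), ("COM", "B"), ("B", "YOU"), ("B", "SAN")]

def Spec_solve (data : List (String × String)) (out : Int × Int) : Prop := out = solve_alt data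
instance (data : List (String × String)) (out : Int × Int) : Decidable (Spec_solve data out) := by
  unfold Spec_solve; infer_instance

-- ===== CLAIM (what is proved, stated in full; the proofs are below) =====
def Claim_equal_solve : Prop :=
  ∀ (data : List (String × String)), Dom_solve data → Pre_solve data → Spec_solve data (solve data)

-- ===== LEMMAS AND PROOFS =====

theorem pv_witness_ok : Dom_solve pvWitness_solve ∧ Pre_solve pvWitness_solve := by
  refine ⟨by decide, ?_, ?_⟩ <;> decide

-- builders: A's paired fold projects to B's two folds
theorem buildA_eq (data : List (String × String)) :
    buildA data = (buildCh data, buildAdj data) := by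
  unfold buildA buildCh buildAdj
  suffices h : ∀ (l : List (String × String)) (g bi : PySem.Dict String (List String)),
      l.foldl (fun gb p =>
          (gb.1.modify p.1 [] (· ++ [p.2]),
           (gb.2.modify p.1 [] (· ++ [p.2])).modify p.2 [] (· ++ [p.1]))) (g, bi)
        = (l.foldl (fun d p => d.modify p.1 [] (· ++ [p.2])) g,
           l.foldl (fun d p => (d.modify p.1 [] (· ++ [p.2])).modify p.2 [] (· ++ [p.1])) bi) by
    exact h data _ _
  intro l
  induction l with
  | nil => intro g bi; rfl
  | cons p l ih => intro g bi; simp only [List.foldl_cons]; exact ih _ _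

-- ---- part 2: lockstep simulation ----
theorem innerAB (t c : String) (cs : List String) :
    ∀ (ns nxt : List String) (dist : PySem.Dict String Int),
      innerA t c ns ((cs ++ nxt).reverse) dist =
        Sum.map id (fun p => ((cs ++ p.1).reverse, p.2)) (innerB t c ns nxt dist) := by
  intro ns
  induction ns with
  | nil => intro nxt dist; rfl
  | cons n ns ih =>
    intro nxt dist
    have hv : n :: (cs ++ nxt).reverse = (cs ++ (nxt ++ [n])).reverse := by
      simp
    cases h : (n == t) with
    | true => simp only [innerA, innerB, h, if_true, Sum.map_inl, id]
    | false =>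
      simp only [innerA, innerB, h]
      rw [hv]
      exact ih (nxt ++ [n]) _

theorem loopAB (bi : PySem.Dict String (List String)) (t : String) :
    ∀ (f : Nat) (cs nxt : List String) (dist : PySem.Dict String Int) (seen : PySem.Set String),
      loopA bi t f ((cs ++ nxt).reverse) dist seen = loopB bi t f cs nxt dist seen := by
  intro f
  induction f with
  | zero => intro cs nxt dist seen; simp [loopA, loopB]
  | succ f ih =>
    have hcons : ∀ (c : String) (cs nxt : List String) (dist : PySem.Dict String Int)
        (seen : PySem.Set String),
        loopA bi t (f+1) ((c :: cs ++ nxt).reverse) dist seen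
          = loopB bi t (f+1) (c :: cs) nxt dist seen := by
      intro c cs nxt dist seen
      have hrev : (c :: cs ++ nxt).reverse = (cs ++ nxt).reverse ++ [c] := by simp
      rw [hrev]
      simp only [loopA, loopB, List.getLast?_concat, List.dropLast_concat]
      by_cases hs : PySem.Set.contains seen c = true
      · simp only [hs, if_true]
        exact ih cs nxt dist seen
      · simp only [eq_false_of_ne_true hs]
        rw [innerAB t c cs (bi.getD c []) nxt dist]
        cases hI : innerB t c (bi.getD c []) nxt dist with
        | inl r => simp
        | inr nd => simp only [Sum.map_inr]; exact ih cs nd.1 nd.2 _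
    intro cs nxt dist seen
    cases cs with
    | cons c cs => exact hcons c cs nxt dist seen
    | nil =>
      cases nxt with
      | nil => simp [loopA, loopB]
      | cons n ns =>
        have h2 : loopB bi t (f+1) [] (n :: ns) dist seen
            = loopB bi t (f+1) (n :: ns) [] dist seen := by
          simp only [loopB]
        rw [h2]
        have := hcons n ns [] dist seen
        simpa using this

-- ---- part 1 ----
def Gsum (g : PySem.Dict String (List String)) (F : Nat) (front : List String) (d : Int) : Int :=
  (front.map (fun x => walkA g F x d)).sum

theorem getD_buildCh (data : List (String × String)) (x : String) :
    (buildCh data).getD x [] = childrenOf data x := by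
  unfold buildCh childrenOf
  simpa using PySem.Dict.getD_foldl_modify_append data PySem.Dict.empty x

theorem frontier_empty_ge (data : List (String × String))
    (hemp : downFrontier data (data.length + 1) = []) :
    ∀ l, data.length + 1 ≤ l → downFrontier data l = [] := by
  intro l hl
  induction hl with
  | refl => exact hemp
  | step _ ih => simp [downFrontier, ih]

theorem mem_frontier_le (data : List (String × String))
    (hemp : downFrontier data (data.length + 1) = []) (x : String) (l : Nat)
    (hx : x ∈ downFrontier data l) : l ≤ data.length := by
  by_contra hgt
  rw [frontier_empty_ge data hemp l (by omega)] at hx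
  cases hx

theorem child_frontier (data : List (String × String)) (x : String) (l : Nat)
    (hx : x ∈ downFrontier data l) (c : String) (hc : c ∈ childrenOf data x) :
    c ∈ downFrontier data (l + 1) :=
  List.mem_flatMap.mpr ⟨x, hx, hc⟩

theorem walk_suff (data : List (String × String))
    (hemp : downFrontier data (data.length + 1) = []) :
    ∀ (f1 f2 : Nat) (x : String) (l : Nat) (d : Int),
      x ∈ downFrontier data l →
      data.length < f1 + l → data.length < f2 + l →
      walkA (buildCh data) f1 x d = walkA (buildCh data) f2 x d := by
  intro f1
  induction f1 using Nat.strong_induction_on with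
  | _ f1 ih =>
    intro f2 x l d hx h1 h2
    have hl : l ≤ data.length := mem_frontier_le data hemp x l hx
    obtain ⟨a, rfl⟩ : ∃ a, f1 = a + 1 := ⟨f1 - 1, by omega⟩
    obtain ⟨b, rfl⟩ : ∃ b, f2 = b + 1 := ⟨f2 - 1, by omega⟩
    simp only [walkA]
    apply PySem.List.foldl_congr_mem
    intro acc c hc
    have hcc : c ∈ downFrontier data (l + 1) :=
      child_frontier data x l hx c (by rwa [getD_buildCh] at hc)
    have : walkA (buildCh data) a c (d + 1) = walkA (buildCh data) b c (d + 1) :=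
      ih a (by omega) b c (l + 1) (d + 1) hcc (by omega) (by omega)
    rw [this]

theorem walk_unfold (data : List (String × String))
    (hemp : downFrontier data (data.length + 1) = []) (x : String) (l : Nat) (d : Int)
    (hx : x ∈ downFrontier data l) :
    walkA (buildCh data) (data.length + 1) x d =
      1 + d * (childrenOf data x).length +
        Gsum (buildCh data) (data.length + 1) (childrenOf data x) (d + 1) := by
  simp only [walkA, getD_buildCh]
  have hstep : (childrenOf data x).foldl
      (fun acc node => acc + d + walkA (buildCh data) data.length node (d + 1)) 1
      = (childrenOf data x).foldl
      (fun acc node => acc + d + walkA (buildCh data) (data.length + 1) node (d + 1)) 1 := by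
    apply PySem.List.foldl_congr_mem
    intro acc c hc
    have hcc : c ∈ downFrontier data (l + 1) := child_frontier data x l hx c hc
    have hl1 : l + 1 ≤ data.length := mem_frontier_le data hemp c (l + 1) hcc
    rw [walk_suff data hemp data.length (data.length + 1) c (l + 1) (d + 1) hcc
      (by omega) (by omega)]
  rw [hstep]
  have := PySem.List.foldl_add (childrenOf data x)
    (fun node => d + walkA (buildCh data) (data.length + 1) node (d + 1)) 1
  have harg : (fun (acc : Int) node => acc + d + walkA (buildCh data) (data.length + 1) node (d + 1))
      = (fun acc node => acc + (d + walkA (buildCh data) (data.length + 1) node (d + 1))) := by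
    funext acc node; ring
  rw [harg, this, PySem.List.sum_map_add_int, PySem.List.sum_map_const_int]
  unfold Gsum
  ring

theorem sum_flatMap' {α : Type} (l : List α) (f : α → List Int) :
    (l.flatMap f).sum = (l.map (fun x => (f x).sum)).sum := by
  induction l with
  | nil => rfl
  | cons a l ih => simp [List.flatMap_cons, ih]

theorem sum_cast {α : Type} (f : α → Nat) (l : List α) :
    (((l.map f).sum : Nat) : Int) = (l.map (fun x => (f x : Int))).sum := by
  induction l with
  | nil => simp
  | cons a l ih => simp [ih]

theorem gsum_step (data : List (String × String))
    (hemp : downFrontier data (data.length + 1) = [])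
    (front : List String) (m : Nat) (d : Int)
    (hfr : ∀ x ∈ front, x ∈ downFrontier data m) :
    Gsum (buildCh data) (data.length + 1) front d =
      (front.length : Int) + d * ((front.flatMap (fun n => (buildCh data).getD n [])).length : Int) +
        Gsum (buildCh data) (data.length + 1)
          (front.flatMap (fun n => (buildCh data).getD n [])) (d + 1) := by
  have hmap : front.map (fun x => walkA (buildCh data) (data.length + 1) x d)
      = front.map (fun x => 1 + d * ((childrenOf data x).length : Int) +
          Gsum (buildCh data) (data.length + 1) (childrenOf data x) (d + 1)) := by
    apply List.map_congr_left
    intro x hx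
    exact walk_unfold data hemp x m d (hfr x hx)
  have hlen : ((front.flatMap (fun n => (buildCh data).getD n [])).length : Int)
      = (front.map (fun x => ((childrenOf data x).length : Int))).sum := by
    simp only [List.length_flatMap, getD_buildCh]
    exact sum_cast _ front
  have hsumflat : Gsum (buildCh data) (data.length + 1)
        (front.flatMap (fun n => (buildCh data).getD n [])) (d + 1)
      = (front.map (fun n => Gsum (buildCh data) (data.length + 1)
          ((buildCh data).getD n []) (d + 1))).sum := by
    unfold Gsum
    rw [List.map_flatMap, sum_flatMap']
  have e1 : Gsum (buildCh data) (data.length + 1) front d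
      = (front.length : Int) * 1 +
        (d * (front.map (fun x => ((childrenOf data x).length : Int))).sum +
          (front.map (fun x =>
            Gsum (buildCh data) (data.length + 1) (childrenOf data x) (d + 1))).sum) := by
    have hG : Gsum (buildCh data) (data.length + 1) front d
        = (front.map (fun x => walkA (buildCh data) (data.length + 1) x d)).sum := rfl
    rw [hG, hmap]
    rw [show (fun x => 1 + d * ((childrenOf data x).length : Int) +
            Gsum (buildCh data) (data.length + 1) (childrenOf data x) (d + 1))
        = (fun x => (1 : Int) + (d * ((childrenOf data x).length : Int) +
            Gsum (buildCh data) (data.length + 1) (childrenOf data x) (d + 1))) from by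
          funext x; ring]
    rw [PySem.List.sum_map_add_int, PySem.List.sum_map_add_int, PySem.List.sum_map_const_int,
      List.sum_map_mul_left]
  rw [e1, hlen, hsumflat]
  simp only [getD_buildCh]
  ring

theorem levelB_eq (data : List (String × String))
    (hemp : downFrontier data (data.length + 1) = []) :
    ∀ (fuel : Nat) (front : List String) (m : Nat) (d acc : Int),
      (∀ x ∈ front, x ∈ downFrontier data m) →
      data.length < fuel + m →
      levelB (buildCh data) fuel front d acc =
        acc + (d - 1) * (front.length : Int) + Gsum (buildCh data) (data.length + 1) front d := by
  intro fuel
  induction fuel with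
  | zero =>
    intro front m d acc hfr hlt
    cases front with
    | nil => simp [levelB, Gsum]
    | cons x l =>
      have := mem_frontier_le data hemp x m (hfr x List.mem_cons_self)
      omega
  | succ fuel ih =>
    intro front m d acc hfr hlt
    cases hfe : front with
    | nil => simp [levelB, Gsum]
    | cons x l =>
      rw [← hfe]
      have hne : front.isEmpty = false := by rw [hfe]; rfl
      simp only [levelB, hne, Bool.false_eq_true, if_false]
      have hnext : ∀ y ∈ front.flatMap (fun n => (buildCh data).getD n []),
          y ∈ downFrontier data (m + 1) := by
        intro y hy
        obtain ⟨n, hn, hyn⟩ := List.mem_flatMap.mp hy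
        exact child_frontier data n m (hfr n hn) y (by rwa [getD_buildCh] at hyn)
      rw [ih (front.flatMap (fun n => (buildCh data).getD n [])) (m + 1) (d + 1)
        (acc + d * (front.length : Int)) hnext (by omega)]
      rw [gsum_step data hemp front m d hfr]
      ring

theorem part1_eq (data : List (String × String)) (h : Pre_solve data) :
    walkA (buildCh data) (data.length + 1) "COM" 0 - 1 =
      levelB (buildCh data) (data.length + 2) ((buildCh data).getD "COM" []) 1 0 := by
  obtain ⟨hemp, -⟩ := h
  have hcom : "COM" ∈ downFrontier data 0 := by simp [downFrontier]
  have hfr : ∀ x ∈ (buildCh data).getD "COM" [], x ∈ downFrontier data 1 := by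
    intro x hx
    exact child_frontier data "COM" 0 hcom x (by rwa [getD_buildCh] at hx)
  have hB := levelB_eq data hemp (data.length + 2) ((buildCh data).getD "COM" [])
    1 1 0 hfr (by omega)
  have hA := walk_unfold data hemp "COM" 0 0 hcom
  rw [hA, hB, getD_buildCh]
  ring_nf

-- ===== VERDICT (by name: the statement is the Claim_ definition above) =====
theorem solve_spec : Claim_equal_solve := by
  intro data _hdom hpre
  unfold Spec_solve solve solve_alt
  rw [buildA_eq]
  refine Prod.ext ?_ ?_
  · simpa using part1_eq data hpre
  · simpa using loopAB (buildAdj data) "SAN" (2 * data.length + 2) ["YOU"] [] PySem.Dict.empty PySem.Set.empty
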